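-- pv_equiv track=rewrite | github.com/priyanshigokani/02oct_priyanshi_python | assingnment/module-2/Q_2.py | list_of_numbers
-- ===== SOURCE A (Python) =====
-- def list_of_numbers(n):
--     largest=n[0]
--     smallest=n[0]
--     total = 0
--
--     for num in n:
--         if num > largest :
--             largest = num
--         if num < smallest:
--             smallest = num
--         total += num
--
--     return largest , smallest,total
-- ===== SOURCE B (Python) =====
-- def list_of_numbers(n):
--     return max(n), min(n), sum(n)
-- ===== Notes on version B (the rewrite author's own statement) =====
-- stated objective: idiomatic
-- what changed: Replaces the single interleaved accumulator loop with three independent library scans max(n), min(n), sum(n).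
import Mathlib
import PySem

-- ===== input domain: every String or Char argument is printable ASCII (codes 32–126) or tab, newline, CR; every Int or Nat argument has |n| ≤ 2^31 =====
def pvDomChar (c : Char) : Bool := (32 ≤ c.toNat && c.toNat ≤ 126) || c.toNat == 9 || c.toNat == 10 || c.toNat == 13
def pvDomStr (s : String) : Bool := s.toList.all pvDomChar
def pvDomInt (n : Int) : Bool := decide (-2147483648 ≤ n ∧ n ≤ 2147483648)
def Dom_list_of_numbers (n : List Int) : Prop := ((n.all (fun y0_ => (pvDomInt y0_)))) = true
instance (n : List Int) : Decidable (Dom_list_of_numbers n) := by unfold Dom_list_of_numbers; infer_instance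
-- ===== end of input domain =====

-- B replaces A's single interleaved accumulator loop with three independent library
-- scans (max, min, sum) — same cost, more idiomatic.

-- ===== PORT A =====
def list_of_numbers (n : List Int) : Int × Int × Int :=
  match n with
  | [] => (0, 0, 0)  -- unreachable: n[0] raises IndexError on [], excluded by Pre_
  | x :: _ =>
    n.foldl (fun (st : Int × Int × Int) num =>
      (if num > st.1 then num else st.1,
       if num < st.2.1 then num else st.2.1,
       st.2.2 + num)) (x, x, 0)

-- ===== PORT B =====
def list_of_numbers_alt (n : List Int) : Int × Int × Int :=
  match PySem.List.max? n (fun y => y), PySem.List.min? n (fun y => y) with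
  | some mx, some mn => (mx, mn, n.sum)
  | _, _ => (0, 0, 0)  -- unreachable: max/min raise on [], excluded by Pre_

-- ===== PRECONDITION & SPEC =====
-- A raises IndexError on the empty list (n[0]); B raises ValueError there (max([])).
def Pre_list_of_numbers (n : List Int) : Prop := n ≠ []
instance (n : List Int) : Decidable (Pre_list_of_numbers n) := by unfold Pre_list_of_numbers; infer_instance
def pvWitness_list_of_numbers : List Int := [3, -1, 7]

def Spec_list_of_numbers (n : List Int) (out : Int × Int × Int) : Prop := out = list_of_numbers_alt n
instance (n : List Int) (out : Int × Int × Int) : Decidable (Spec_list_of_numbers n out) := by unfold Spec_list_of_numbers; infer_instance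

-- ===== CLAIM (what is proved, stated in full; the proofs are below) =====
def Claim_equal_list_of_numbers : Prop := ∀ (n : List Int), Dom_list_of_numbers n → Pre_list_of_numbers n → Spec_list_of_numbers n (list_of_numbers n)

-- ===== LEMMAS AND PROOFS =====

theorem lon_loop (t : List Int) (l s tot : Int) :
    t.foldl (fun (st : Int × Int × Int) num =>
      (if num > st.1 then num else st.1,
       if num < st.2.1 then num else st.2.1,
       st.2.2 + num)) (l, s, tot)
    = (t.foldl max l, t.foldl min s, tot + t.sum) := by
  induction t generalizing l s tot with
  | nil => simp
  | cons y ys ih =>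
    have h1 : (if y > l then y else l) = max l y := by
      rw [max_def]; split_ifs <;> omega
    have h2 : (if y < s then y else s) = min s y := by
      rw [min_def]; split_ifs <;> omega
    simp only [List.foldl_cons, List.sum_cons, h1, h2, ih]
    congr 1
    congr 1
    ring

-- ===== VERDICT (by name: the statement is the Claim_ definition above) =====
theorem list_of_numbers_spec : Claim_equal_list_of_numbers := by
  intro n _ hpre
  unfold Spec_list_of_numbers list_of_numbers list_of_numbers_alt
  match n with
  | [] => exact absurd rfl hpre
  | x :: t =>
    rw [PySem.List.max?_id_cons, PySem.List.min?_id_cons]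
    simp only [List.foldl_cons, List.sum_cons]
    rw [lon_loop]
    simp
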